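-- pv_equiv track=rewrite | github.com/kstratto/CodeWars | Completed Kata/Social_Golfer_Problem_Validator.py | no_rematches
-- ===== SOURCE A (Python) =====
-- def no_rematches(schedule):
--     """
--     Parameters
--     ----------
--     schedule : Array of strings (all capital letters)
--         Each character represents a golfer.
--         Each string represents a group of players.
--         Each row represents a day of golf.
--
--     Returns
--     -------
--     True if the each player plays with every other at most once.
--     False otherwise
--     """
--     golfers = set()
--     for row in schedule:
--         for group in row:
--             golfers.update(set(group))
--     # Create dictionary with keys golfers, values people they haven't played
--     # with yet
--     unplayed = {g: golfers - set(g) for g in golfers}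
--     for row in schedule:
--         for group in row:
--             for g in group:
--                 opponents = set(group.replace(g, ""))
--                 if not opponents <= unplayed[g]:
--                     return False
--                 unplayed[g] -= opponents
--     return True
-- ===== SOURCE B (Python) =====
-- def no_rematches(schedule):
--     # One pass: remember every ordered pair of golfers that has already met.
--     played = set()
--     for row in schedule:
--         for group in row:
--             for g in group:
--                 for d in group:
--                     if d != g:
--                         if (g, d) in played:
--                             return False
--                         played.add((g, d))
--     return True
-- ===== Notes on version B (the rewrite author's own statement) =====
-- stated objective: simpler
-- what changed: Replaces A's golfer-collection pre-pass and per-golfer dict of remaining-opponent sets (subset tests and set differences) by a single pass over the schedule that keeps one set of ordered golfer pairs that have already met and tests each new pair for membership.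
import Mathlib
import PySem

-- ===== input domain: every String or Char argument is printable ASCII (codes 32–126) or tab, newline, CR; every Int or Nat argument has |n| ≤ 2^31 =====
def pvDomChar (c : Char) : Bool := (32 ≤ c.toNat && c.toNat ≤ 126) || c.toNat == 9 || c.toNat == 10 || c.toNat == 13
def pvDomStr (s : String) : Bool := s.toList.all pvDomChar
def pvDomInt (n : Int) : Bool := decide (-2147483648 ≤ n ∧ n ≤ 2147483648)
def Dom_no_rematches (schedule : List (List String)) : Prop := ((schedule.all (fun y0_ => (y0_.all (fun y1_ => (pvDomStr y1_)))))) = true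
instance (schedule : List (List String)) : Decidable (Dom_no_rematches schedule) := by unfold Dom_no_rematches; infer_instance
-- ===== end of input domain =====

-- B replaces A's golfer pre-pass and per-golfer remaining-opponents dict by a single pass
-- over the schedule that records every ordered pair of golfers that has already met (objective: simpler).

-- ===== PORT A =====
-- golfers = set(); for row in schedule: for group in row: golfers.update(set(group))
def pvAGolfers (schedule : List (List String)) : PySem.Set Char :=
  schedule.foldl
    (fun s row => row.foldl (fun s group => PySem.Set.update s (PySem.Set.ofList group.toList)) s)
    PySem.Set.empty

-- unplayed = {g: golfers - set(g) for g in golfers}  (dict only looked up afterwards)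
def pvAInit (golfers : PySem.Set Char) : PySem.Dict Char (PySem.Set Char) :=
  golfers.foldl (fun d g => d.insert g (PySem.Set.diff golfers [g])) PySem.Dict.empty

-- body of 'for g in group': opponents-check and unplayed[g] -= opponents; none = 'return False'.
-- unplayed[g]: g is always a key (every char of the schedule is in golfers), so getD is exact here.
def pvAChar (group : List Char) (st : PySem.Dict Char (PySem.Set Char)) (g : Char) :
    Option (PySem.Dict Char (PySem.Set Char)) :=
  let opponents := PySem.Set.ofList (PySem.Chars.replace group [g] [])
  let ug := st.getD g PySem.Set.empty
  if PySem.Set.issubset opponents ug then some (st.insert g (PySem.Set.diff ug opponents)) else none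

def pvAGroup (group : List Char) : List Char → PySem.Dict Char (PySem.Set Char) → Option (PySem.Dict Char (PySem.Set Char))
  | [], st => some st
  | g :: gs, st =>
    match pvAChar group st g with
    | none => none
    | some st' => pvAGroup group gs st'

def pvARow : List String → PySem.Dict Char (PySem.Set Char) → Option (PySem.Dict Char (PySem.Set Char))
  | [], st => some st
  | group :: groups, st =>
    match pvAGroup group.toList group.toList st with
    | none => none
    | some st' => pvARow groups st'

def pvARows : List (List String) → PySem.Dict Char (PySem.Set Char) → Option (PySem.Dict Char (PySem.Set Char))
  | [], st => some st
  | row :: rows, st =>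
    match pvARow row st with
    | none => none
    | some st' => pvARows rows st'

def no_rematches (schedule : List (List String)) : Bool :=
  match pvARows schedule (pvAInit (pvAGolfers schedule)) with
  | none => false
  | some _ => true

-- ===== PORT B =====
-- inner 'for d in group': skip d == g, fail on a pair already played, else record it
def pvBPair (g : Char) : List Char → PySem.Set (Char × Char) → Option (PySem.Set (Char × Char))
  | [], pl => some pl
  | d :: ds, pl =>
    if d ≠ g then
      if PySem.Set.contains pl (g, d) then none
      else pvBPair g ds (PySem.Set.add pl (g, d))
    else pvBPair g ds pl

def pvBGroup (group : List Char) : List Char → PySem.Set (Char × Char) → Option (PySem.Set (Char × Char))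
  | [], pl => some pl
  | g :: gs, pl =>
    match pvBPair g group pl with
    | none => none
    | some pl' => pvBGroup group gs pl'

def pvBRow : List String → PySem.Set (Char × Char) → Option (PySem.Set (Char × Char))
  | [], pl => some pl
  | group :: groups, pl =>
    match pvBGroup group.toList group.toList pl with
    | none => none
    | some pl' => pvBRow groups pl'

def pvBRows : List (List String) → PySem.Set (Char × Char) → Option (PySem.Set (Char × Char))
  | [], pl => some pl
  | row :: rows, pl =>
    match pvBRow row pl with
    | none => none
    | some pl' => pvBRows rows pl'

def no_rematches_alt (schedule : List (List String)) : Bool :=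
  match pvBRows schedule PySem.Set.empty with
  | none => false
  | some _ => true

-- ===== PRECONDITION & SPEC =====
def Spec_no_rematches (schedule : List (List String)) (out : Bool) : Prop := out = no_rematches_alt schedule
instance (schedule : List (List String)) (out : Bool) : Decidable (Spec_no_rematches schedule out) := by unfold Spec_no_rematches; infer_instance

-- ===== CLAIM (what is proved, stated in full; the proofs are below) =====
def Claim_equal_no_rematches : Prop := ∀ (schedule : List (List String)), Dom_no_rematches schedule → Spec_no_rematches schedule (no_rematches schedule)

-- ===== LEMMAS AND PROOFS =====
-- A's two-character-string replace on a single-character pattern is a filter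
theorem pvReplaceGo_single (g : Char) : ∀ (fuel : Nat) (l acc : List Char), l.length ≤ fuel →
    PySem.Chars.replace.go [g] [] fuel l acc = acc.reverse ++ l.filter (fun x => x ≠ g)
  | 0, l, acc, h => by
    have hl : l = [] := List.eq_nil_of_length_eq_zero (Nat.le_zero.mp h)
    subst hl; simp [PySem.Chars.replace.go]
  | fuel+1, [], acc, h => by simp [PySem.Chars.replace.go]
  | fuel+1, c :: t, acc, h => by
    rw [PySem.Chars.replace.go]
    by_cases hc : c = g
    · simp [List.isPrefixOf, hc, pvReplaceGo_single g fuel t acc (by simpa using h)]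
    · simp [List.isPrefixOf, hc, Ne.symm hc,
        pvReplaceGo_single g fuel t (c :: acc) (by simpa using h)]

theorem pvReplace_single (cs : List Char) (g : Char) :
    PySem.Chars.replace cs [g] [] = cs.filter (fun x => x ≠ g) := by
  rw [PySem.Chars.replace]
  simp [pvReplaceGo_single g cs.length cs [] le_rfl]

theorem pvMem_opponents (group : List Char) (g d : Char) :
    d ∈ PySem.Set.ofList (PySem.Chars.replace group [g] []) ↔ d ∈ group ∧ d ≠ g := by
  simp [pvReplace_single, PySem.Set.mem_ofList, List.mem_filter]

-- every character of the schedule is a golfer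
theorem pvMem_rowFold (row : List String) (s : PySem.Set Char) (c : Char) :
    c ∈ row.foldl (fun s group => PySem.Set.update s (PySem.Set.ofList group.toList)) s ↔
      c ∈ s ∨ ∃ grp ∈ row, c ∈ grp.toList := by
  induction row generalizing s with
  | nil => simp
  | cons grp rest ih =>
    simp [ih, PySem.Set.mem_update, PySem.Set.mem_ofList, or_assoc]

theorem pvMem_schedFold (schedule : List (List String)) :
    ∀ (s : PySem.Set Char) (c : Char),
      c ∈ schedule.foldl
          (fun s row => row.foldl (fun s group => PySem.Set.update s (PySem.Set.ofList group.toList)) s) s ↔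
        c ∈ s ∨ ∃ row ∈ schedule, ∃ grp ∈ row, c ∈ grp.toList := by
  induction schedule with
  | nil => simp
  | cons row rest ih =>
    intro s c
    simp [ih, pvMem_rowFold, or_assoc]

theorem pvMem_golfers (schedule : List (List String)) (c : Char) :
    c ∈ pvAGolfers schedule ↔ ∃ row ∈ schedule, ∃ grp ∈ row, c ∈ grp.toList := by
  unfold pvAGolfers
  rw [pvMem_schedFold]
  simp [PySem.Set.empty]

-- getD after a keyed insert fold
theorem pvGetD_insertFold (f : Char → PySem.Set Char) (k : Char) :
    ∀ (l : List Char) (d : PySem.Dict Char (PySem.Set Char)),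
      (l.foldl (fun d g => d.insert g (f g)) d).getD k PySem.Set.empty =
        if k ∈ l then f k else d.getD k PySem.Set.empty
  | [], d => by simp
  | x :: l, d => by
    simp only [List.foldl_cons, pvGetD_insertFold f k l (d.insert x (f x))]
    by_cases hl : k ∈ l
    · simp [hl, List.mem_cons]
    · by_cases hx : k = x <;> simp [hl, hx, PySem.Dict.getD_insert]

-- the simulation relation: d is still unplayed for g  ↔  the ordered pair (g,d) has not met
def pvRel (G : PySem.Set Char) (st : PySem.Dict Char (PySem.Set Char))
    (pl : PySem.Set (Char × Char)) : Prop :=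
  ∀ g ∈ G, ∀ d : Char, d ∈ st.getD g PySem.Set.empty ↔ (d ∈ G ∧ d ≠ g ∧ (g, d) ∉ pl)

def pvOptRel (G : PySem.Set Char) (o1 : Option (PySem.Dict Char (PySem.Set Char)))
    (o2 : Option (PySem.Set (Char × Char))) : Prop :=
  (o1 = none ∧ o2 = none) ∨ ∃ st pl, o1 = some st ∧ o2 = some pl ∧ pvRel G st pl

theorem pvRel_init (G : PySem.Set Char) : pvRel G (pvAInit G) PySem.Set.empty := by
  intro g hg d
  unfold pvAInit
  rw [pvGetD_insertFold]
  simp [hg, PySem.Set.mem_diff, PySem.Set.empty]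

-- B's inner pair loop on a duplicate-free group
theorem pvBPair_none (g : Char) : ∀ (ds : List Char), ds.Nodup → ∀ (pl : PySem.Set (Char × Char)),
    (pvBPair g ds pl = none ↔ ∃ d ∈ ds, d ≠ g ∧ (g, d) ∈ pl)
  | [], _, pl => by simp [pvBPair]
  | d :: ds, hnd, pl => by
    have hd : d ∉ ds := (List.nodup_cons.mp hnd).1
    have ih := pvBPair_none g ds (List.nodup_cons.mp hnd).2
    by_cases hdg : d = g
    · subst hdg
      simp only [pvBPair, ne_eq, not_true_eq_false, if_false, ih]
      constructor
      · rintro ⟨d', hd', hne, hpl⟩; exact ⟨d', List.mem_cons_of_mem _ hd', hne, hpl⟩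
      · rintro ⟨d', hd', hne, hpl⟩
        rcases List.mem_cons.mp hd' with h | h
        · exact absurd h hne
        · exact ⟨d', h, hne, hpl⟩
    · simp only [pvBPair, ne_eq, hdg, not_false_eq_true, if_true]
      by_cases hin : (g, d) ∈ pl
      · simp only [(PySem.Set.contains_iff pl (g, d)).2 hin, if_true]
        constructor
        · intro _; exact ⟨d, List.mem_cons_self, hdg, hin⟩
        · intro _; trivial
      · have hcont : PySem.Set.contains pl (g, d) = false := by
          by_contra h
          exact hin ((PySem.Set.contains_iff pl (g, d)).1 (by revert h; cases PySem.Set.contains pl (g, d) <;> simp))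
        simp only [hcont, Bool.false_eq_true, if_false, ih]
        constructor
        · rintro ⟨d', hd', hne, hpl⟩
          rcases (PySem.Set.mem_add pl (g, d) (g, d')).1 hpl with h | h
          · exact ⟨d', List.mem_cons_of_mem _ hd', hne, h⟩
          · exact absurd (by injection h with _ h2; exact h2 ▸ hd') hd
        · rintro ⟨d', hd', hne, hpl⟩
          rcases List.mem_cons.mp hd' with h | h
          · exact absurd (h ▸ hpl) hin
          · exact ⟨d', h, hne, (PySem.Set.mem_add pl (g, d) (g, d')).2 (Or.inl hpl)⟩

theorem pvBPair_some (g : Char) : ∀ (ds : List Char), ds.Nodup → ∀ (pl pl' : PySem.Set (Char × Char)),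
    pvBPair g ds pl = some pl' → ∀ p, (p ∈ pl' ↔ p ∈ pl ∨ ∃ d ∈ ds, d ≠ g ∧ p = (g, d))
  | [], _, pl, pl', h, p => by
    simp only [pvBPair, Option.some.injEq] at h
    simp [← h]
  | d :: ds, hnd, pl, pl', h, p => by
    have ih := pvBPair_some g ds (List.nodup_cons.mp hnd).2
    by_cases hdg : d = g
    · subst hdg
      simp only [pvBPair, ne_eq, not_true_eq_false, if_false] at h
      rw [ih pl pl' h p]
      constructor
      · rintro (h | ⟨d', hd', hne, hp⟩)
        · exact Or.inl h
        · exact Or.inr ⟨d', List.mem_cons_of_mem _ hd', hne, hp⟩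
      · rintro (h | ⟨d', hd', hne, hp⟩)
        · exact Or.inl h
        · rcases List.mem_cons.mp hd' with hh | hh
          · exact absurd hh hne
          · exact Or.inr ⟨d', hh, hne, hp⟩
    · simp only [pvBPair, ne_eq, hdg, not_false_eq_true, if_true] at h
      by_cases hin : PySem.Set.contains pl (g, d) = true
      · rw [if_pos hin] at h; cases h
      · rw [if_neg hin] at h
        rw [ih _ pl' h p, PySem.Set.mem_add]
        constructor
        · rintro ((h | h) | ⟨d', hd', hne, hp⟩)
          · exact Or.inl h
          · exact Or.inr ⟨d, List.mem_cons_self, hdg, h⟩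
          · exact Or.inr ⟨d', List.mem_cons_of_mem _ hd', hne, hp⟩
        · rintro (h | ⟨d', hd', hne, hp⟩)
          · exact Or.inl (Or.inl h)
          · rcases List.mem_cons.mp hd' with hh | hh
            · exact Or.inl (Or.inr (hh ▸ hp))
            · exact Or.inr ⟨d', hh, hne, hp⟩

-- one occurrence, duplicate-free group: A fails iff B fails, successes stay related
theorem pvChar_none_iff (G : PySem.Set Char) (group : List Char) (g : Char)
    (st : PySem.Dict Char (PySem.Set Char)) (pl : PySem.Set (Char × Char))
    (hg : g ∈ G) (hsub : ∀ c ∈ group, c ∈ G) (hrel : pvRel G st pl) :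
    (pvAChar group st g = none ↔ ∃ d ∈ group, d ≠ g ∧ (g, d) ∈ pl) := by
  unfold pvAChar
  by_cases hss : PySem.Set.issubset (PySem.Set.ofList (PySem.Chars.replace group [g] []))
      (st.getD g PySem.Set.empty) = true
  · simp only [hss, if_true]
    constructor
    · intro h; cases h
    · rintro ⟨d, hd, hne, hpl⟩
      have := (PySem.Set.issubset_iff _ _).1 hss d ((pvMem_opponents group g d).2 ⟨hd, hne⟩)
      rw [hrel g hg d] at this
      exact absurd hpl this.2.2
  · simp only [hss, Bool.false_eq_true, if_false, true_iff]
    rw [PySem.Set.issubset_iff] at hss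
    push_neg at hss
    obtain ⟨d, hd, hnd⟩ := hss
    obtain ⟨hdg, hne⟩ := (pvMem_opponents group g d).1 hd
    rw [hrel g hg d] at hnd
    push_neg at hnd
    exact ⟨d, hdg, hne, hnd (hsub d hdg) hne⟩

theorem pvChar_some (G : PySem.Set Char) (group : List Char) (g : Char)
    (st st' : PySem.Dict Char (PySem.Set Char)) (pl pl' : PySem.Set (Char × Char))
    (hg : g ∈ G) (hsub : ∀ c ∈ group, c ∈ G) (hnd : group.Nodup) (hrel : pvRel G st pl)
    (hA : pvAChar group st g = some st') (hB : pvBPair g group pl = some pl') :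
    pvRel G st' pl' := by
  unfold pvAChar at hA
  by_cases hss : PySem.Set.issubset (PySem.Set.ofList (PySem.Chars.replace group [g] []))
      (st.getD g PySem.Set.empty) = true
  · rw [if_pos hss, Option.some.injEq] at hA
    subst hA
    have hmem := pvBPair_some g group hnd pl pl' hB
    intro g' hg' d
    by_cases hgg : g' = g
    · subst hgg
      rw [PySem.Dict.getD_insert_self, PySem.Set.mem_diff, hrel g' hg' d, pvMem_opponents]
      constructor
      · rintro ⟨⟨hdG, hdg, hpl⟩, hnop⟩
        refine ⟨hdG, hdg, fun hc => ?_⟩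
        rcases (hmem (g', d)).1 hc with h | ⟨d2, hd2, hne2, he⟩
        · exact hpl h
        · injection he with _ h2; exact hnop ⟨h2 ▸ hd2, h2 ▸ hne2⟩
      · rintro ⟨hdG, hdg, hpl'⟩
        refine ⟨⟨hdG, hdg, fun hc => hpl' ((hmem (g', d)).2 (Or.inl hc))⟩, fun hop => ?_⟩
        exact hpl' ((hmem (g', d)).2 (Or.inr ⟨d, hop.1, hop.2, rfl⟩))
    · rw [PySem.Dict.getD_insert_of_ne st _ _ hgg, hrel g' hg' d]
      constructor
      · rintro ⟨hdG, hdg, hpl⟩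
        refine ⟨hdG, hdg, fun hc => ?_⟩
        rcases (hmem (g', d)).1 hc with h | ⟨d2, _, _, he⟩
        · exact hpl h
        · injection he with h1 _; exact hgg h1
      · rintro ⟨hdG, hdg, hpl'⟩
        exact ⟨hdG, hdg, fun hc => hpl' ((hmem (g', d)).2 (Or.inl hc))⟩
  · rw [if_neg hss] at hA; cases hA

theorem pvGroup_lockstep (G : PySem.Set Char) (group : List Char)
    (hnd : group.Nodup) (hsub : ∀ c ∈ group, c ∈ G) :
    ∀ (os : List Char), (∀ g ∈ os, g ∈ G) →
      ∀ st pl, pvRel G st pl → pvOptRel G (pvAGroup group os st) (pvBGroup group os pl)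
  | [], _, st, pl, hrel => by
    right; exact ⟨st, pl, rfl, rfl, hrel⟩
  | g :: os, hos, st, pl, hrel => by
    have hg : g ∈ G := hos g List.mem_cons_self
    have hnone := pvChar_none_iff G group g st pl hg hsub hrel
    rw [pvAGroup, pvBGroup]
    cases hA : pvAChar group st g with
    | none =>
      have hBn : pvBPair g group pl = none := (pvBPair_none g group hnd pl).2 (hnone.1 hA)
      rw [hBn]; left; exact ⟨rfl, rfl⟩
    | some st' =>
      cases hB : pvBPair g group pl with
      | none =>
        exact absurd (hnone.2 ((pvBPair_none g group hnd pl).1 hB)) (by simp [hA])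
      | some pl' =>
        exact pvGroup_lockstep G group hnd hsub os (fun x hx => hos x (List.mem_cons_of_mem _ hx))
          st' pl' (pvChar_some G group g st st' pl pl' hg hsub hnd hrel hA hB)

-- groups whose characters are all equal: both sides succeed, nothing changes
theorem pvBPair_alleq (g : Char) : ∀ (ds : List Char), (∀ d ∈ ds, d = g) →
    ∀ (pl : PySem.Set (Char × Char)), pvBPair g ds pl = some pl
  | [], _, pl => rfl
  | d :: ds, h, pl => by
    rw [pvBPair, if_neg (by simp [h d List.mem_cons_self])]
    exact pvBPair_alleq g ds (fun x hx => h x (List.mem_cons_of_mem _ hx)) pl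

theorem pvGroup_alleq (G : PySem.Set Char) (group : List Char) (c : Char)
    (heq : ∀ x ∈ group, x = c) :
    ∀ (os : List Char), (∀ g ∈ os, g ∈ group) → ∀ st pl, pvRel G st pl →
      ∃ st', pvAGroup group os st = some st' ∧ pvBGroup group os pl = some pl ∧ pvRel G st' pl
  | [], _, st, pl, hrel => ⟨st, rfl, rfl, hrel⟩
  | g :: os, hos, st, pl, hrel => by
    have hgc : g = c := heq g (hos g List.mem_cons_self)
    have hopp : PySem.Set.ofList (PySem.Chars.replace group [g] []) = [] := by
      rw [pvReplace_single, List.filter_eq_nil_iff.2 (fun x hx => by simp [heq x hx, hgc])]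
      rfl
    have hA : pvAChar group st g =
        some (st.insert g (PySem.Set.diff (st.getD g PySem.Set.empty) [])) := by
      unfold pvAChar
      rw [hopp, if_pos (by rw [PySem.Set.issubset_iff]; intro x hx; cases hx)]
    have hrel' : pvRel G (st.insert g (PySem.Set.diff (st.getD g PySem.Set.empty) [])) pl := by
      intro g' hg' d
      by_cases hgg : g' = g
      · subst hgg
        rw [PySem.Dict.getD_insert_self, PySem.Set.mem_diff, ← hrel g' hg' d]
        simp
      · rw [PySem.Dict.getD_insert_of_ne st _ _ hgg]
        exact hrel g' hg' d
    rw [pvAGroup, pvBGroup, hA, pvBPair_alleq g group (fun x hx => (heq x hx).trans hgc.symm) pl]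
    exact pvGroup_alleq G group c heq os (fun x hx => hos x (List.mem_cons_of_mem _ hx)) _ pl hrel'

-- groups with a duplicated character and a second character: A fails
theorem pvAChar_getD_mono (group : List Char) (st st' : PySem.Dict Char (PySem.Set Char))
    (g c e : Char) (h : pvAChar group st g = some st')
    (he : e ∉ st.getD c PySem.Set.empty) : e ∉ st'.getD c PySem.Set.empty := by
  unfold pvAChar at h
  by_cases hss : PySem.Set.issubset (PySem.Set.ofList (PySem.Chars.replace group [g] []))
      (st.getD g PySem.Set.empty) = true
  · rw [if_pos hss, Option.some.injEq] at h
    subst h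
    by_cases hgc : c = g
    · subst hgc
      rw [PySem.Dict.getD_insert_self, PySem.Set.mem_diff]
      exact fun hc => he hc.1
    · rw [PySem.Dict.getD_insert_of_ne st _ _ hgc]
      exact he
  · rw [if_neg hss] at h; cases h

theorem pvAChar_none_at (group : List Char) (st : PySem.Dict Char (PySem.Set Char)) (c e : Char)
    (he : e ∈ group) (hne : e ≠ c) (hst : e ∉ st.getD c PySem.Set.empty) :
    pvAChar group st c = none := by
  unfold pvAChar
  rw [if_neg]
  intro hss
  exact hst ((PySem.Set.issubset_iff _ _).1 hss e ((pvMem_opponents group c e).2 ⟨he, hne⟩))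

theorem pvAGroup_none_of_mem (group : List Char) (c e : Char) (he : e ∈ group) (hne : e ≠ c) :
    ∀ (os : List Char) (st : PySem.Dict Char (PySem.Set Char)),
      c ∈ os → e ∉ st.getD c PySem.Set.empty → pvAGroup group os st = none
  | [], st, hc, _ => by cases hc
  | g :: os, st, hc, hst => by
    rw [pvAGroup]
    by_cases hgc : g = c
    · subst hgc
      rw [pvAChar_none_at group st g e he hne hst]
    · cases hA : pvAChar group st g with
      | none => rfl
      | some st' =>
        exact pvAGroup_none_of_mem group c e he hne os st'
          ((List.mem_cons.mp hc).resolve_left (fun h => hgc h.symm))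
          (pvAChar_getD_mono group st st' g c e hA hst)

theorem pvAGroup_none_dup (group : List Char) (c e : Char) (he : e ∈ group) (hne : e ≠ c) :
    ∀ (os1 os2 : List Char) (st : PySem.Dict Char (PySem.Set Char)),
      c ∈ os2 → pvAGroup group (os1 ++ c :: os2) st = none
  | [], os2, st, hc2 => by
    rw [List.nil_append, pvAGroup]
    cases hA : pvAChar group st c with
    | none => rfl
    | some st' =>
      refine pvAGroup_none_of_mem group c e he hne os2 st' hc2 ?_
      unfold pvAChar at hA
      by_cases hss : PySem.Set.issubset (PySem.Set.ofList (PySem.Chars.replace group [c] []))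
          (st.getD c PySem.Set.empty) = true
      · rw [if_pos hss, Option.some.injEq] at hA
        subst hA
        rw [PySem.Dict.getD_insert_self, PySem.Set.mem_diff]
        rintro ⟨-, hnop⟩
        exact hnop ((pvMem_opponents group c e).2 ⟨he, hne⟩)
      · rw [if_neg hss] at hA; cases hA
  | g :: os1, os2, st, hc2 => by
    rw [List.cons_append, pvAGroup]
    cases hA : pvAChar group st g with
    | none => rfl
    | some st' => exact pvAGroup_none_dup group c e he hne os1 os2 st' hc2

-- groups with a duplicated character and a second character: B fails
theorem pvBPair_none_of_mem (g d : Char) (hne : d ≠ g) :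
    ∀ (ds : List Char) (pl : PySem.Set (Char × Char)),
      d ∈ ds → (g, d) ∈ pl → pvBPair g ds pl = none
  | [], pl, hd, _ => by cases hd
  | d' :: ds, pl, hd, hpl => by
    rw [pvBPair]
    by_cases hdg : d' = g
    · rw [if_neg (by simp [hdg])]
      exact pvBPair_none_of_mem g d hne ds pl
        ((List.mem_cons.mp hd).resolve_left (fun h => hne (h.trans hdg))) hpl
    · rw [if_pos (by simp [hdg])]
      by_cases hdd : d' = d
      · rw [if_pos ((PySem.Set.contains_iff pl (g, d')).2 (hdd ▸ hpl))]
      · cases hin : PySem.Set.contains pl (g, d') with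
        | true => rfl
        | false =>
          rw [if_neg (by simp)]
          exact pvBPair_none_of_mem g d hne ds _
            ((List.mem_cons.mp hd).resolve_left (fun h => hdd h.symm))
            ((PySem.Set.mem_add pl (g, d') (g, d)).2 (Or.inl hpl))

theorem pvBPair_none_dup (g d : Char) (hne : d ≠ g) :
    ∀ (l1 l2 : List Char) (pl : PySem.Set (Char × Char)),
      d ∈ l2 → pvBPair g (l1 ++ d :: l2) pl = none
  | [], l2, pl, hd2 => by
    rw [List.nil_append, pvBPair, if_pos (by simp [hne])]
    cases hin : PySem.Set.contains pl (g, d) with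
    | true => rfl
    | false =>
      rw [if_neg (by simp)]
      exact pvBPair_none_of_mem g d hne l2 _ hd2
        ((PySem.Set.mem_add pl (g, d) (g, d)).2 (Or.inr rfl))
  | d' :: l1, l2, pl, hd2 => by
    rw [List.cons_append, pvBPair]
    by_cases hdg : d' = g
    · rw [if_neg (by simp [hdg])]
      exact pvBPair_none_dup g d hne l1 l2 pl hd2
    · rw [if_pos (by simp [hdg])]
      cases hin : PySem.Set.contains pl (g, d') with
      | true => rfl
      | false =>
        rw [if_neg (by simp)]
        exact pvBPair_none_dup g d hne l1 l2 _ hd2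

theorem pvBGroup_none_of_mem (group : List Char) (e : Char)
    (hfail : ∀ pl, pvBPair e group pl = none) :
    ∀ (os : List Char) (pl : PySem.Set (Char × Char)), e ∈ os → pvBGroup group os pl = none
  | [], pl, hc => by cases hc
  | g :: os, pl, hc => by
    rw [pvBGroup]
    by_cases hge : g = e
    · subst hge; rw [hfail pl]
    · cases hB : pvBPair g group pl with
      | none => rfl
      | some pl' =>
        exact pvBGroup_none_of_mem group e hfail os pl'
          ((List.mem_cons.mp hc).resolve_left (fun h => hge h.symm))

-- a duplicate yields the decomposition l = l1 ++ x :: l2 with x ∈ l2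
theorem pvDup_decomp {x : Char} : ∀ {l : List Char}, l.Duplicate x →
    ∃ l1 l2, l = l1 ++ x :: l2 ∧ x ∈ l2 := by
  intro l h
  induction h with
  | cons_mem hm => exact ⟨[], _, rfl, hm⟩
  | cons_duplicate _ ih =>
    obtain ⟨l1, l2, hdec, hm⟩ := ih
    exact ⟨_ :: l1, l2, by rw [hdec]; rfl, hm⟩

-- the per-group step, all cases combined
theorem pvGroup_step (G : PySem.Set Char) (group : List Char)
    (hsub : ∀ c ∈ group, c ∈ G) (st : PySem.Dict Char (PySem.Set Char))
    (pl : PySem.Set (Char × Char)) (hrel : pvRel G st pl) :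
    pvOptRel G (pvAGroup group group st) (pvBGroup group group pl) := by
  by_cases hnd : group.Nodup
  · exact pvGroup_lockstep G group hnd hsub group (fun g hg => hsub g hg) st pl hrel
  · obtain ⟨c, hdup⟩ := List.exists_duplicate_iff_not_nodup.2 hnd
    have hcg : c ∈ group := hdup.mem
    by_cases hex : ∃ e ∈ group, e ≠ c
    · obtain ⟨e, he, hne⟩ := hex
      obtain ⟨l1, l2, hdec, hm⟩ := pvDup_decomp hdup
      subst hdec
      left
      constructor
      · exact pvAGroup_none_dup _ c e he hne l1 l2 st hm
      · exact pvBGroup_none_of_mem _ e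
          (fun pl' => pvBPair_none_dup e c (Ne.symm hne) l1 l2 pl' hm) _ pl he
    · push_neg at hex
      obtain ⟨st', hA, hB, hrel'⟩ :=
        pvGroup_alleq G group c hex group (fun g hg => hg) st pl hrel
      right
      exact ⟨st', pl, hA, hB, hrel'⟩

theorem pvRow_step (G : PySem.Set Char) :
    ∀ (row : List String), (∀ grp ∈ row, ∀ c ∈ grp.toList, c ∈ G) →
      ∀ st pl, pvRel G st pl → pvOptRel G (pvARow row st) (pvBRow row pl)
  | [], _, st, pl, hrel => by right; exact ⟨st, pl, rfl, rfl, hrel⟩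
  | grp :: row, hsub, st, pl, hrel => by
    rw [pvARow, pvBRow]
    rcases pvGroup_step G grp.toList (hsub grp List.mem_cons_self) st pl hrel with
      ⟨h1, h2⟩ | ⟨st', pl', h1, h2, hrel'⟩
    · rw [h1, h2]; left; exact ⟨rfl, rfl⟩
    · rw [h1, h2]
      exact pvRow_step G row (fun g hg => hsub g (List.mem_cons_of_mem _ hg)) st' pl' hrel'

theorem pvRows_step (G : PySem.Set Char) :
    ∀ (schedule : List (List String)), (∀ row ∈ schedule, ∀ grp ∈ row, ∀ c ∈ grp.toList, c ∈ G) →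
      ∀ st pl, pvRel G st pl → pvOptRel G (pvARows schedule st) (pvBRows schedule pl)
  | [], _, st, pl, hrel => by right; exact ⟨st, pl, rfl, rfl, hrel⟩
  | row :: rows, hsub, st, pl, hrel => by
    rw [pvARows, pvBRows]
    rcases pvRow_step G row (hsub row List.mem_cons_self) st pl hrel with
      ⟨h1, h2⟩ | ⟨st', pl', h1, h2, hrel'⟩
    · rw [h1, h2]; left; exact ⟨rfl, rfl⟩
    · rw [h1, h2]
      exact pvRows_step G rows (fun r hr => hsub r (List.mem_cons_of_mem _ hr)) st' pl' hrel'

-- ===== VERDICT (by name: the statement is the Claim_ definition above) =====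
theorem no_rematches_spec : Claim_equal_no_rematches := by
  intro schedule _
  unfold Spec_no_rematches
  have hsub : ∀ row ∈ schedule, ∀ grp ∈ row, ∀ c ∈ grp.toList, c ∈ pvAGolfers schedule := by
    intro row hr grp hg c hc
    exact (pvMem_golfers schedule c).2 ⟨row, hr, grp, hg, hc⟩
  have h := pvRows_step (pvAGolfers schedule) schedule hsub
      (pvAInit (pvAGolfers schedule)) PySem.Set.empty (pvRel_init _)
  unfold no_rematches no_rematches_alt
  rcases h with ⟨h1, h2⟩ | ⟨st, pl, h1, h2, _⟩ <;> rw [h1, h2]
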